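-- pv_equiv track=rewrite | github.com/AbrarMojahidRafi/Algorithm-Python | LabSection02_22101593_CSE221LabAssignment04_Fall2023/task6.py | dfs
-- ===== SOURCE A (Python) =====
-- def dfs(grid, r, c, visitedList):
--     if r < 0 or c < 0 or r >= len(grid) or c >= len(grid[0]) or grid[r][c] == '#' or visitedList[r][c]:
--         return 0
--
--     visitedList[r][c] = True
--     diamonds = 0
--     if grid[r][c] == 'D':
--         diamonds = 1
--     diamonds += dfs(grid, r - 1, c, visitedList)
--     diamonds += dfs(grid, r + 1, c, visitedList)
--     diamonds += dfs(grid, r, c - 1, visitedList)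
--     diamonds += dfs(grid, r, c + 1, visitedList)
--
--     return diamonds
-- ===== SOURCE B (Python) =====
-- def dfs(grid, r, c, visitedList):
--     diamonds = 0
--     stack = [(r, c)]
--     while stack:
--         r, c = stack.pop()
--         if r < 0 or c < 0 or r >= len(grid) or c >= len(grid[0]) or grid[r][c] == '#' or visitedList[r][c]:
--             continue
--         visitedList[r][c] = True
--         if grid[r][c] == 'D':
--             diamonds += 1
--         stack.append((r, c + 1))
--         stack.append((r, c - 1))
--         stack.append((r + 1, c))
--         stack.append((r - 1, c))
--     return diamonds
-- ===== Notes on version B (the rewrite author's own statement) =====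
-- stated objective: alternative
-- what changed: Replaced the 4-way recursive flood fill with an iterative explicit-stack loop (pop-time guarding/marking, neighbours pushed in reverse so the visit order is identical) accumulating the diamond count.
-- outside the precondition, e.g. on dfs([['#', 'D'], ['x']], 0, 0, [[False, False], [False]]): A returns 0, B returns 0
import Mathlib
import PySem

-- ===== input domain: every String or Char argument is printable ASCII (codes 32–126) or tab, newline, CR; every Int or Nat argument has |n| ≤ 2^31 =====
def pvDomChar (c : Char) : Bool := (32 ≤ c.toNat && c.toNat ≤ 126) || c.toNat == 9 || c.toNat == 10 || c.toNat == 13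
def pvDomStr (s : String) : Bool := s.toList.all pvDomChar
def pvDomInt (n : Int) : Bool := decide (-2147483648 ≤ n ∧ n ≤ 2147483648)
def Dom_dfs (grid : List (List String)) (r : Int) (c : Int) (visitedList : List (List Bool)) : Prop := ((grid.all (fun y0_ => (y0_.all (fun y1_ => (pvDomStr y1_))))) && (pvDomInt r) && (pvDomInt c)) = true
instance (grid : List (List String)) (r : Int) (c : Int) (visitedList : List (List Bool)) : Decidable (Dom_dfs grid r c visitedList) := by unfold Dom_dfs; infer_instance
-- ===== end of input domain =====

-- B replaces A's 4-way recursive flood fill by an iterative explicit-stack loop (pop-time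
-- guarding/marking, neighbours pushed in reverse) accumulating the diamond count; both mutate
-- visitedList the same way in Python, and the theorems below are about the return value.

-- shared state helpers: number of unvisited cells (termination measure), marking a cell,
-- the pop/recursion guard of the Python `if ... or ...:` line, and the current cell's content
def pvCountFalse (v : List (List Bool)) : Nat := (v.map (fun row => row.count false)).sum

def pvMark (v : List (List Bool)) (i j : Nat) : List (List Bool) :=
  v.modify i (fun row => row.set j true)

def pvCell (grid : List (List String)) (r : Int) (c : Int) : String :=
  ((PySem.List.pyGet? grid r).bind (fun row => PySem.List.pyGet? row c)).getD ""

def pvVisited (v : List (List Bool)) (r : Int) (c : Int) : Option Bool :=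
  (PySem.List.pyGet? v r).bind (fun row => PySem.List.pyGet? row c)

-- the guard `r < 0 or c < 0 or r >= len(grid) or c >= len(grid[0]) or grid[r][c] == '#' or
-- visitedList[r][c]`; a `none` lookup (IndexError in Python, outside Pre_) also skips here
def pvSkip (grid : List (List String)) (r : Int) (c : Int) (v : List (List Bool)) : Bool :=
  decide (r < 0) || decide (c < 0) || decide ((grid.length : Int) ≤ r) ||
    decide (((grid.headD []).length : Int) ≤ c) || (pvCell grid r c == "#") ||
    (pvVisited v r c != some false)

theorem pvCount_set_lt (row : List Bool) (j : Nat) (h : row[j]? = some false) :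
    (row.set j true).count false < row.count false := by
  induction row generalizing j with
  | nil => simp at h
  | cons b t ih =>
    cases j with
    | zero =>
      simp at h
      subst h
      simp
    | succ j =>
      simp at h
      have := ih j h
      simp [List.count_cons]
      omega

theorem pvMark_lt (v : List (List Bool)) (i j : Nat) (row : List Bool)
    (h1 : v[i]? = some row) (h2 : row[j]? = some false) :
    pvCountFalse (pvMark v i j) < pvCountFalse v := by
  induction v generalizing i with
  | nil => simp at h1
  | cons h t ih =>
    cases i with
    | zero =>
      simp at h1
      subst h1
      have := pvCount_set_lt h j h2
      simp [pvMark, pvCountFalse, List.modify]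
      omega
    | succ i =>
      simp at h1
      have := ih i h1
      simp [pvMark, pvCountFalse, List.modify] at this ⊢
      omega

theorem pvNoSkip_lt (grid : List (List String)) (r : Int) (c : Int) (v : List (List Bool))
    (hg : ¬ pvSkip grid r c v = true) :
    pvCountFalse (pvMark v r.toNat c.toNat) < pvCountFalse v := by
  have hr : (0 : Int) ≤ r := by
    rcases lt_or_ge r 0 with h | h
    · exact absurd (by unfold pvSkip; simp [h]) hg
    · exact h
  have hc : (0 : Int) ≤ c := by
    rcases lt_or_ge c 0 with h | h
    · exact absurd (by unfold pvSkip; simp [h]) hg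
    · exact h
  have hvis : pvVisited v r c = some false := by
    rcases h : pvVisited v r c with _ | b
    · exact absurd (by unfold pvSkip; simp [h]) hg
    · cases b
      · rfl
      · exact absurd (by unfold pvSkip; simp [h]) hg
  unfold pvVisited at hvis
  rw [PySem.List.pyGet?_of_nonneg _ hr] at hvis
  cases hrow : v[r.toNat]? with
  | none => rw [hrow] at hvis; simp at hvis
  | some row =>
    rw [hrow] at hvis
    simp only [Option.bind_some] at hvis
    rw [PySem.List.pyGet?_of_nonneg _ hc] at hvis
    exact pvMark_lt v r.toNat c.toNat row hrow hvis

-- ===== PORT A =====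
-- A's recursion mutates visitedList, so the port threads the visited state; the Nat argument of
-- dfsFuel is only a termination device (pvCountFalse visitedList + 1 is always sufficient, and
-- pvSim below proves the result with that fuel correct).
def dfsFuel (grid : List (List String)) : Nat → Int → Int → List (List Bool) → Int × List (List Bool)
  | 0, _, _, v => (0, v)
  | fuel + 1, r, c, v =>
    if pvSkip grid r c v then (0, v)
    else
      let v' := pvMark v r.toNat c.toNat
      let a1 := dfsFuel grid fuel (r - 1) c v'
      let a2 := dfsFuel grid fuel (r + 1) c a1.2
      let a3 := dfsFuel grid fuel r (c - 1) a2.2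
      let a4 := dfsFuel grid fuel r (c + 1) a3.2
      ((if pvCell grid r c = "D" then (1 : Int) else 0) + a1.1 + a2.1 + a3.1 + a4.1, a4.2)

def dfs (grid : List (List String)) (r : Int) (c : Int) (visitedList : List (List Bool)) : Int :=
  (dfsFuel grid (pvCountFalse visitedList + 1) r c visitedList).1

-- ===== PORT B =====
-- the explicit-stack loop of Source B: pop a cell, skip or mark-and-count, push the four neighbours
-- (in reverse, so the top of the stack is (r-1, c))
def dfsLoop (grid : List (List String)) (stack : List (Int × Int)) (v : List (List Bool))
    (acc : Int) : Int :=
  match stack with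
  | [] => acc
  | (r, c) :: rest =>
    if hg : pvSkip grid r c v then
      dfsLoop grid rest v acc
    else
      have hlt : pvCountFalse (pvMark v r.toNat c.toNat) < pvCountFalse v :=
        pvNoSkip_lt grid r c v hg
      dfsLoop grid ((r - 1, c) :: (r + 1, c) :: (r, c - 1) :: (r, c + 1) :: rest)
        (pvMark v r.toNat c.toNat)
        (acc + (if pvCell grid r c = "D" then (1 : Int) else 0))
termination_by (4 * pvCountFalse v + stack.length)
decreasing_by
  all_goals (try simp only [List.length_cons])
  all_goals omega

def dfs_alt (grid : List (List String)) (r : Int) (c : Int) (visitedList : List (List Bool)) : Int :=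
  dfsLoop grid [(r, c)] visitedList 0

-- ===== PRECONDITION & SPEC =====
-- Pre_ excludes ragged shapes (a grid or visitedList row shorter than grid[0], or fewer
-- visitedList rows than grid rows) when the start is in bounds: on such inputs the flood fill can
-- hit an IndexError, though A still returns on some of them when the region avoids the short rows.
def Pre_dfs (grid : List (List String)) (r : Int) (c : Int) (visitedList : List (List Bool)) : Prop :=
  (r < 0 ∨ c < 0 ∨ (grid.length : Int) ≤ r ∨ ((grid.headD []).length : Int) ≤ c) ∨
  (grid.length ≤ visitedList.length ∧
   (∀ row ∈ grid, (grid.headD []).length ≤ row.length) ∧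
   (∀ row ∈ visitedList, (grid.headD []).length ≤ row.length))
instance (grid : List (List String)) (r : Int) (c : Int) (visitedList : List (List Bool)) : Decidable (Pre_dfs grid r c visitedList) := by unfold Pre_dfs; infer_instance

def pvWitness_dfs : List (List String) × Int × Int × List (List Bool) :=
  ([["D", "."], [".", "#"]], 0, 0, [[false, false], [false, false]])

def Spec_dfs (grid : List (List String)) (r : Int) (c : Int) (visitedList : List (List Bool)) (out : Int) : Prop := out = dfs_alt grid r c visitedList
instance (grid : List (List String)) (r : Int) (c : Int) (visitedList : List (List Bool)) (out : Int) : Decidable (Spec_dfs grid r c visitedList out) := by unfold Spec_dfs; infer_instance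

-- ===== CLAIM (what is proved, stated in full; the proofs are below) =====
def Claim_equal_dfs : Prop := ∀ (grid : List (List String)) (r : Int) (c : Int) (visitedList : List (List Bool)), Dom_dfs grid r c visitedList → Pre_dfs grid r c visitedList → Spec_dfs grid r c visitedList (dfs grid r c visitedList)

-- ===== LEMMAS AND PROOFS =====
-- simulation: running the loop on (r,c)::rest is running A's recursion at (r,c) (with any
-- sufficient fuel) and then the loop on rest with the updated state and accumulator
theorem dfsFuel_le (grid : List (List String)) :
    ∀ (fuel : Nat) (r c : Int) (v : List (List Bool)),
      pvCountFalse (dfsFuel grid fuel r c v).2 ≤ pvCountFalse v := by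
  intro fuel
  induction fuel with
  | zero => intro r c v; simp [dfsFuel]
  | succ f ih =>
    intro r c v
    rw [dfsFuel]
    by_cases hg : pvSkip grid r c v = true
    · simp [hg]
    · rw [if_neg hg]
      exact (ih _ _ _).trans ((ih _ _ _).trans ((ih _ _ _).trans ((ih _ _ _).trans
        (Nat.le_of_lt (pvNoSkip_lt grid r c v hg)))))

theorem pvSim (grid : List (List String)) :
    ∀ (n : Nat), ∀ (fuel : Nat) (v : List (List Bool)),
      pvCountFalse v ≤ n → pvCountFalse v < fuel →
      ∀ (r c : Int) (rest : List (Int × Int)) (acc : Int),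
        dfsLoop grid ((r, c) :: rest) v acc
          = dfsLoop grid rest (dfsFuel grid fuel r c v).2 (acc + (dfsFuel grid fuel r c v).1) := by
  intro n
  induction n using Nat.strong_induction_on with
  | _ n ih =>
    intro fuel v hn hf r c rest acc
    cases fuel with
    | zero => exact absurd hf (Nat.not_lt_zero _)
    | succ f =>
      rw [dfsLoop]
      by_cases hg : pvSkip grid r c v = true
      · rw [dif_pos hg, dfsFuel, if_pos hg]
        norm_num
      · rw [dif_neg hg, dfsFuel, if_neg hg]
        have hlt := pvNoSkip_lt grid r c v hg
        have l1 := dfsFuel_le grid f (r - 1) c (pvMark v r.toNat c.toNat)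
        have l2 := dfsFuel_le grid f (r + 1) c (dfsFuel grid f (r - 1) c (pvMark v r.toNat c.toNat)).2
        have l3 := dfsFuel_le grid f r (c - 1)
          (dfsFuel grid f (r + 1) c (dfsFuel grid f (r - 1) c (pvMark v r.toNat c.toNat)).2).2
        rw [ih (pvCountFalse (pvMark v r.toNat c.toNat)) (by omega) f
              (pvMark v r.toNat c.toNat) (Nat.le_refl _) (by omega)]
        rw [ih (pvCountFalse (dfsFuel grid f (r - 1) c (pvMark v r.toNat c.toNat)).2) (by omega) f
              _ (Nat.le_refl _) (by omega)]
        rw [ih (pvCountFalse (dfsFuel grid f (r + 1) c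
                (dfsFuel grid f (r - 1) c (pvMark v r.toNat c.toNat)).2).2) (by omega) f
              _ (Nat.le_refl _) (by omega)]
        rw [ih (pvCountFalse (dfsFuel grid f r (c - 1)
                (dfsFuel grid f (r + 1) c
                  (dfsFuel grid f (r - 1) c (pvMark v r.toNat c.toNat)).2).2).2) (by omega) f
              _ (Nat.le_refl _) (by omega)]
        congr 1
        ring

theorem dfs_spec : Claim_equal_dfs := by
  intro grid r c v _ _
  unfold Spec_dfs dfs dfs_alt
  rw [pvSim grid (pvCountFalse v) (pvCountFalse v + 1) v (Nat.le_refl _) (by omega) r c [] 0]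
  rw [dfsLoop]
  omega
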